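-- pv_equiv track=rewrite | github.com/nihao-hit/-Offer- | 动态规划.py | pebbleMerge
-- ===== SOURCE A (Python) =====
-- def pebbleMerge(nums):
--     '''
--     :type nums:list[int]
--     :rtype:tuple(int)
--     '''
--     from sys import maxsize
--     n = len(nums)
--     result,w = [[[0]*(n+1) for i in range(n)] for j in range(2)]
--     for i in range(n):
--         w[i][1] = nums[i]
--     for k in range(2,n+1):
--         for i in range(n):
--             w[i][k] = w[i][1]+w[(i+1)%n][k-1]
--             j = i+1
--             while j <= i+k-1:
--                 result[i][k] = max(result[i][k],
--                     result[i][j-i]+result[j%n][i+k-j]+w[i][k])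
--                 j += 1
--     maxCount = 0
--     for row in result:
--         maxCount = max(maxCount,row[-1])
--     return maxCount
-- ===== SOURCE B (Python) =====
-- from functools import lru_cache
--
-- def pebbleMerge(nums):
--     # Top-down memoized recursion on circular segments (start, length) instead of
--     # A's bottom-up filling of the result/w tables; segment weights come from
--     # prefix sums of the doubled array instead of A's w table.
--     n = len(nums)
--     pre = [0]
--     for x in nums + nums:
--         pre.append(pre[-1] + x)
--
--     @lru_cache(maxsize=None)
--     def best(i, k):
--         # max floored score for merging the k circular stones starting at i
--         if k < 2:
--             return 0
--         s = pre[i + k] - pre[i]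
--         b = 0
--         for a in range(1, k):
--             c = best(i, a) + best((i + a) % n, k - a) + s
--             if c > b:
--                 b = c
--         return b
--
--     ans = 0
--     for i in range(n):
--         v = best(i, n)
--         if v > ans:
--             ans = v
--     return ans
-- ===== Notes on version B (the rewrite author's own statement) =====
-- stated objective: alternative
-- what changed: Replaces A's bottom-up filling of the result and w tables by triple nested loops with a demand-driven top-down lru_cache-memoized recursion on circular segments (start, length), computing segment weights from prefix sums of the doubled array instead of A's w table; an asymptotically faster endpoint-split O(n^2) DP is NOT exact for this function (it disagrees with A on lists containing negative values), so the O(n^3) recurrence itself is kept.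
import Mathlib
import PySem

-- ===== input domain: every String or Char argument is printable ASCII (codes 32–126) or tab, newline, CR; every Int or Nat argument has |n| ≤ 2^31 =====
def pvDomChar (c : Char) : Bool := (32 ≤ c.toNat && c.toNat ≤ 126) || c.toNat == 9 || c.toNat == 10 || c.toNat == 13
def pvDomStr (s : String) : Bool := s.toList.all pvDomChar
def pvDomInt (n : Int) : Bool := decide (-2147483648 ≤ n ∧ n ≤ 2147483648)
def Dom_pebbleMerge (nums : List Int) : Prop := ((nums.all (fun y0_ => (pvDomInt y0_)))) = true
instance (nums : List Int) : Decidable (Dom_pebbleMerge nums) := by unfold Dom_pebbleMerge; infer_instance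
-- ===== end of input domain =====

-- B replaces A's bottom-up triple-loop filling of the result/w tables by a top-down
-- memoized recursion on circular segments (dict memo keyed by (start,length)) with
-- prefix sums of the doubled array for the segment weights; same values everywhere.

-- ===== PORT A =====
-- a 2-D python list of ints, as a function table (the programs only read/update cells)
structure PvTbl where
  f : ℕ → ℕ → Int

-- a 1-D python list of ints
structure PvVec where
  f : ℕ → Int

-- t[i][k] = v on a 2-D python list, as a pointwise update
def pvUpd (t : PvTbl) (i k : ℕ) (v : Int) : PvTbl :=
  ⟨fun a b => if a = i ∧ b = k then v else t.f a b⟩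

-- body of A's 'for i in range(n)' loop at level k: sets w[i][k], then runs the 'while j <= i+k-1' loop
def pvAinner (nums : List Int) (k i : ℕ) (st : PvTbl × PvTbl) : PvTbl × PvTbl :=
  let n := nums.length
  let w := pvUpd st.2 i k (st.2.f i 1 + st.2.f ((i + 1) % n) (k - 1))
  let result := (List.range' (i + 1) (k - 1)).foldl
    (fun r j => pvUpd r i k (max (r.f i k) (r.f i (j - i) + r.f (j % n) (i + k - j) + w.f i k))) st.1
  (result, w)

def pebbleMerge (nums : List Int) : Int :=
  let n := nums.length
  -- result, w = zero tables (cells outside [0,n)×[0,n] are never touched)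
  let w1 := (List.range n).foldl (fun w i => pvUpd w i 1 (nums.getD i 0)) ⟨fun _ _ => 0⟩
  -- for k in range(2, n+1): for i in range(n): …
  let st := (List.range' 2 (n - 1)).foldl
    (fun st k => (List.range n).foldl (fun st i => pvAinner nums k i st) st)
    (⟨fun _ _ => 0⟩, w1)
  -- maxCount over row[-1] = result[i][n]
  (List.range n).foldl (fun maxCount i => max maxCount (st.1.f i n)) 0

-- ===== PORT B =====
-- B's lru_cache-memoized recursive helper 'best(i, k)': the cache is semantically
-- transparent for this pure function, so it ports as the plain recursion; the
-- fuel argument only bounds the depth (k ≤ fuel on every call B makes)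
def pvBest (nums : List Int) (pre : PvVec) : ℕ → ℕ → ℕ → Int
  | 0, _, _ => 0
  | fuel + 1, i, k =>
    if k < 2 then 0 else
    (List.range' 1 (k - 1)).foldl
      (fun b a =>
        let c := pvBest nums pre fuel i a + pvBest nums pre fuel ((i + a) % nums.length) (k - a)
          + (pre.f (i + k) - pre.f i)
        if c > b then c else b) 0

def pebbleMerge_alt (nums : List Int) : Int :=
  let n := nums.length
  -- pre[t+1] = pre[t] + (nums+nums)[t]  (prefix sums of the doubled list)
  let pre : PvVec := (List.range (2 * n)).foldl
    (fun pre t => ⟨fun u => if u = t + 1 then pre.f t + (nums ++ nums).getD t 0 else pre.f u⟩) ⟨fun _ => 0⟩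
  -- ans = running max of best(i, n) over i in range(n)
  (List.range n).foldl
    (fun ans i =>
      let v := pvBest nums pre n i n
      if v > ans then v else ans) 0

-- ===== PRECONDITION & SPEC =====
def Spec_pebbleMerge (nums : List Int) (out : Int) : Prop := out = pebbleMerge_alt nums
instance (nums : List Int) (out : Int) : Decidable (Spec_pebbleMerge nums out) := by unfold Spec_pebbleMerge; infer_instance

-- ===== CLAIM (what is proved, stated in full; the proofs are below) =====
def Claim_equal_pebbleMerge : Prop := ∀ (nums : List Int), Dom_pebbleMerge nums → Spec_pebbleMerge nums (pebbleMerge nums)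

-- ===== LEMMAS AND PROOFS =====

-- w[i][k] for k ≥ 1: sum of the k circular entries starting at i
def pvSw (nums : List Int) : ℕ → ℕ → Int
  | _, 0 => 0
  | i, k + 1 => nums.getD i 0 + pvSw nums ((i + 1) % nums.length) k

-- fueled value of A's result[i][k]
def pvR (nums : List Int) : ℕ → ℕ → ℕ → Int
  | 0, _, _ => 0
  | f + 1, i, k =>
    if k < 2 then 0 else
    (List.range' 1 (k - 1)).foldl
      (fun b a => max b (pvR nums f i a + pvR nums f ((i + a) % nums.length) (k - a) + pvSw nums i k)) 0

def pvRv (nums : List Int) (i k : ℕ) : Int := pvR nums k i k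

def pvPresum (nums : List Int) (t : ℕ) : Int := ((nums ++ nums).take t).sum

lemma pvR_succ (nums : List Int) (f i k : ℕ) : pvR nums (f + 1) i k =
    (if k < 2 then 0 else
    (List.range' 1 (k - 1)).foldl
      (fun b a => max b (pvR nums f i a + pvR nums f ((i + a) % nums.length) (k - a) + pvSw nums i k)) 0) := rfl

lemma pv_if_gt_eq_max (b c : Int) : (if c > b then c else b) = max b c := by
  split_ifs <;> omega

lemma pvR_small (nums : List Int) (f i k : ℕ) (h : k < 2) : pvR nums f i k = 0 := by
  cases f with
  | zero => simp [pvR]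
  | succ f => simp [pvR, h]

lemma pv_mem_range'_bounds {a s n : ℕ} (h : a ∈ List.range' s n) : s ≤ a ∧ a < s + n := by
  rw [List.mem_range'_1] at h; exact h

lemma pvR_fuel (nums : List Int) (k : ℕ) : ∀ f f' i, k ≤ f → k ≤ f' →
    pvR nums f i k = pvR nums f' i k := by
  induction k using Nat.strong_induction_on with
  | _ k ih =>
    intro f f' i hf hf'
    by_cases h2 : k < 2
    · rw [pvR_small nums f i k h2, pvR_small nums f' i k h2]
    · obtain ⟨f, rfl⟩ : ∃ f1, f = f1 + 1 := ⟨f - 1, by omega⟩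
      obtain ⟨f', rfl⟩ : ∃ f1, f' = f1 + 1 := ⟨f' - 1, by omega⟩
      rw [pvR_succ, pvR_succ, if_neg h2, if_neg h2]
      apply PySem.List.foldl_congr_mem
      intro acc a ha
      obtain ⟨ha1, ha2⟩ := pv_mem_range'_bounds ha
      rw [ih a (by omega) f a i (by omega) (le_refl a),
          ih a (by omega) f' a i (by omega) (le_refl a),
          ih (k - a) (by omega) f (k - a) _ (by omega) (le_refl _),
          ih (k - a) (by omega) f' (k - a) _ (by omega) (le_refl _)]

lemma pvRv_eq (nums : List Int) (i k : ℕ) (hk : 2 ≤ k) :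
    pvRv nums i k = (List.range' 1 (k - 1)).foldl
      (fun b a => max b (pvRv nums i a + pvRv nums ((i + a) % nums.length) (k - a) + pvSw nums i k)) 0 := by
  obtain ⟨k1, rfl⟩ : ∃ k1, k = k1 + 1 := ⟨k - 1, by omega⟩
  unfold pvRv
  rw [pvR_succ, if_neg (by omega)]
  apply PySem.List.foldl_congr_mem
  intro acc a ha
  obtain ⟨ha1, ha2⟩ := pv_mem_range'_bounds ha
  rw [pvR_fuel nums a k1 a i (by omega) (le_refl a),
      pvR_fuel nums (k1 + 1 - a) k1 (k1 + 1 - a) _ (by omega) (le_refl _)]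

lemma pv_getD_double (nums : List Int) (l : ℕ) (hn : 0 < nums.length)
    (h : l < 2 * nums.length) :
    (nums ++ nums).getD l 0 = nums.getD (l % nums.length) 0 := by
  by_cases hl : l < nums.length
  · rw [Nat.mod_eq_of_lt hl]
    rw [List.getD_append _ _ _ _ hl]
  · have h1 : l % nums.length = l - nums.length := by
      rw [Nat.mod_eq_sub_mod (by omega), Nat.mod_eq_of_lt (by omega)]
    rw [h1, List.getD_eq_getElem?_getD, List.getD_eq_getElem?_getD,
        List.getElem?_append_right (by omega)]

lemma pv_presum_succ (nums : List Int) (t : ℕ) (h : t < 2 * nums.length) :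
    pvPresum nums (t + 1) = pvPresum nums t + (nums ++ nums).getD t 0 := by
  have ht : t < (nums ++ nums).length := by simp; omega
  unfold pvPresum
  rw [List.take_succ, List.sum_append, List.getElem?_eq_getElem ht]
  simp [List.getD_eq_getElem?_getD, List.getElem?_eq_getElem ht]

lemma pv_presum_sub (nums : List Int) (hn : 0 < nums.length) (len : ℕ) : ∀ l,
    l + len ≤ 2 * nums.length →
    pvPresum nums (l + len) - pvPresum nums l = pvSw nums (l % nums.length) len := by
  induction len with
  | zero => intro l _; simp [pvSw]
  | succ len ih =>
    intro l hl
    have h1 : pvPresum nums (l + 1) = pvPresum nums l + nums.getD (l % nums.length) 0 := by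
      rw [pv_presum_succ nums l (by omega), pv_getD_double nums l hn (by omega)]
    have h2 := ih (l + 1) (by omega)
    show pvPresum nums (l + (len + 1)) - pvPresum nums l = _
    have h3 : l + (len + 1) = (l + 1) + len := by omega
    rw [h3]
    unfold pvSw
    rw [Nat.mod_add_mod]
    omega

-- ===== table update facts =====

lemma pvUpd_same (t : PvTbl) (i k : ℕ) (v : Int) : (pvUpd t i k v).f i k = v := by
  simp [pvUpd]

lemma pvUpd_ne (t : PvTbl) (i k : ℕ) (v : Int) (a b : ℕ) (h : ¬(a = i ∧ b = k)) :
    (pvUpd t i k v).f a b = t.f a b := by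
  simp [pvUpd, h]

lemma pvUpd_pvUpd (t : PvTbl) (i k : ℕ) (v v' : Int) :
    pvUpd (pvUpd t i k v) i k v' = pvUpd t i k v' := by
  unfold pvUpd
  congr 1
  funext a b
  by_cases h : a = i ∧ b = k <;> simp [h]

lemma pvUpd_self (t : PvTbl) (i k : ℕ) : pvUpd t i k (t.f i k) = t := by
  obtain ⟨tf⟩ := t
  unfold pvUpd
  congr 1
  funext a b
  by_cases h : a = i ∧ b = k
  · obtain ⟨rfl, rfl⟩ := h; simp
  · simp [h]

lemma pvRv_small (nums : List Int) (i k : ℕ) (h : k < 2) : pvRv nums i k = 0 :=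
  pvR_small nums k i k h

lemma pvSw_one (nums : List Int) (i : ℕ) : pvSw nums i 1 = nums.getD i 0 := by
  simp [pvSw]

-- ===== A side: loop invariants =====

def pvRmix (nums : List Int) (k t : ℕ) (r : PvTbl) : Prop :=
  ∀ i' k', r.f i' k' = if i' < nums.length ∧ (k' ≤ k - 1 ∨ (k' = k ∧ i' < t)) then pvRv nums i' k' else 0

def pvWmix (nums : List Int) (k t : ℕ) (w : PvTbl) : Prop :=
  ∀ i' k', w.f i' k' = if i' < nums.length ∧ 1 ≤ k' ∧ (k' ≤ k - 1 ∨ (k' = k ∧ i' < t)) then pvSw nums i' k' else 0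

def pvRfull (nums : List Int) (k : ℕ) (r : PvTbl) : Prop :=
  ∀ i' k', r.f i' k' = if i' < nums.length ∧ k' ≤ k then pvRv nums i' k' else 0

def pvWfull (nums : List Int) (k : ℕ) (w : PvTbl) : Prop :=
  ∀ i' k', w.f i' k' = if i' < nums.length ∧ 1 ≤ k' ∧ k' ≤ k then pvSw nums i' k' else 0

lemma pvWmix_upd (nums : List Int) (k t : ℕ) (hk2 : 2 ≤ k) (ht : t < nums.length)
    (w : PvTbl) (hw : pvWmix nums k t w) :
    pvWmix nums k (t + 1) (pvUpd w t k (pvSw nums t k)) := by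
  intro i' k'
  by_cases hik : i' = t ∧ k' = k
  · obtain ⟨rfl, rfl⟩ := hik
    rw [pvUpd_same, if_pos ⟨ht, by omega, Or.inr ⟨rfl, by omega⟩⟩]
  · rw [pvUpd_ne _ _ _ _ _ _ hik, hw i' k']
    exact if_congr (by omega) rfl rfl

lemma pvRmix_upd (nums : List Int) (k t : ℕ) (hk2 : 2 ≤ k) (ht : t < nums.length)
    (r : PvTbl) (hr : pvRmix nums k t r) :
    pvRmix nums k (t + 1) (pvUpd r t k (pvRv nums t k)) := by
  intro i' k'
  by_cases hik : i' = t ∧ k' = k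
  · obtain ⟨rfl, rfl⟩ := hik
    rw [pvUpd_same, if_pos ⟨ht, Or.inr ⟨rfl, by omega⟩⟩]
  · rw [pvUpd_ne _ _ _ _ _ _ hik, hr i' k']
    exact if_congr (by omega) rfl rfl

-- A's inner while loop: only cell (i,k) is ever written, the reads are at other cells
lemma pvA_jloop (nums : List Int) (i k : ℕ) (hk1 : 1 ≤ k) (W : Int) :
    ∀ (L : List ℕ) (r : PvTbl), (∀ j ∈ L, i + 1 ≤ j ∧ j - i < k) →
    L.foldl (fun r j => pvUpd r i k (max (r.f i k) (r.f i (j - i) + r.f (j % nums.length) (i + k - j) + W))) r =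
    pvUpd r i k (L.foldl (fun b j => max b (r.f i (j - i) + r.f (j % nums.length) (i + k - j) + W)) (r.f i k)) := by
  intro L
  induction L with
  | nil => intro r _; simp only [List.foldl_nil]; rw [pvUpd_self]
  | cons j L ih =>
    intro r hL
    obtain ⟨hj1, hj2⟩ := hL j (List.mem_cons_self)
    simp only [List.foldl_cons]
    rw [ih _ (fun j' hj' => hL j' (List.mem_cons_of_mem _ hj'))]
    rw [pvUpd_pvUpd]
    congr 1
    rw [pvUpd_same]
    apply PySem.List.foldl_congr_mem
    intro acc j' hj'
    obtain ⟨h1, h2⟩ := hL j' (List.mem_cons_of_mem _ hj')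
    rw [pvUpd_ne _ _ _ _ _ _ (by omega), pvUpd_ne _ _ _ _ _ _ (by omega)]

lemma pvA_step (nums : List Int) (k t : ℕ) (hk2 : 2 ≤ k) (hkn : k ≤ nums.length)
    (ht : t < nums.length) (r w : PvTbl)
    (hr : pvRmix nums k t r) (hw : pvWmix nums k t w) :
    pvRmix nums k (t + 1) (pvAinner nums k t (r, w)).1 ∧
    pvWmix nums k (t + 1) (pvAinner nums k t (r, w)).2 := by
  have hn : 0 < nums.length := by omega
  have hv : w.f t 1 + w.f ((t + 1) % nums.length) (k - 1) = pvSw nums t k := by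
    rw [hw t 1, hw ((t + 1) % nums.length) (k - 1),
        if_pos ⟨ht, le_refl 1, Or.inl (by omega)⟩,
        if_pos ⟨Nat.mod_lt _ hn, by omega, Or.inl (by omega)⟩]
    obtain ⟨m, rfl⟩ : ∃ m, k = m + 1 := ⟨k - 1, by omega⟩
    simp [pvSw, pvSw_one]
  simp only [pvAinner]
  constructor
  · -- result component
    rw [pvUpd_same, hv]
    rw [pvA_jloop nums t k (by omega) (pvSw nums t k) _ r
        (by intro j hj; obtain ⟨h1, h2⟩ := pv_mem_range'_bounds hj; omega)]
    have hcell : (List.range' (t + 1) (k - 1)).foldl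
        (fun b j => max b (r.f t (j - t) + r.f (j % nums.length) (t + k - j) + pvSw nums t k)) (r.f t k) =
        pvRv nums t k := by
      have h0 : r.f t k = 0 := by rw [hr t k, if_neg (by omega)]
      rw [h0]
      have hmap : List.range' (t + 1) (k - 1) = (List.range' 1 (k - 1)).map (t + ·) := by
        rw [List.map_add_range']
      rw [hmap, List.foldl_map, pvRv_eq nums t k hk2]
      apply PySem.List.foldl_congr_mem
      intro acc a ha
      obtain ⟨ha1, ha2⟩ := pv_mem_range'_bounds ha
      have e1 : t + a - t = a := by omega
      have e2 : t + k - (t + a) = k - a := by omega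
      rw [e1, e2, hr t a, hr ((t + a) % nums.length) (k - a),
          if_pos ⟨ht, Or.inl (by omega)⟩,
          if_pos ⟨Nat.mod_lt _ hn, Or.inl (by omega)⟩]
    rw [hcell]
    exact pvRmix_upd nums k t hk2 ht r hr
  · -- w component
    rw [hv]
    exact pvWmix_upd nums k t hk2 ht w hw

lemma pvA_iloop (nums : List Int) (k : ℕ) (hk2 : 2 ≤ k) (hkn : k ≤ nums.length) :
    ∀ t, t ≤ nums.length → ∀ (st : PvTbl × PvTbl),
    pvRmix nums k 0 st.1 → pvWmix nums k 0 st.2 →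
    pvRmix nums k t ((List.range t).foldl (fun st i => pvAinner nums k i st) st).1 ∧
    pvWmix nums k t ((List.range t).foldl (fun st i => pvAinner nums k i st) st).2 := by
  intro t
  induction t with
  | zero => intro _ st h1 h2; exact ⟨h1, h2⟩
  | succ t ih =>
    intro ht st h1 h2
    rw [List.range_succ, List.foldl_append, List.foldl_cons, List.foldl_nil]
    obtain ⟨hr, hw⟩ := ih (by omega) st h1 h2
    exact pvA_step nums k t hk2 hkn (by omega) _ _ hr hw

lemma pvRmix_of_full (nums : List Int) (k : ℕ) (hk2 : 2 ≤ k) (r : PvTbl)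
    (h : pvRfull nums (k - 1) r) : pvRmix nums k 0 r := by
  intro i' k'
  rw [h i' k']
  exact if_congr (by omega) rfl rfl

lemma pvWmix_of_full (nums : List Int) (k : ℕ) (hk2 : 2 ≤ k) (w : PvTbl)
    (h : pvWfull nums (k - 1) w) : pvWmix nums k 0 w := by
  intro i' k'
  rw [h i' k']
  exact if_congr (by omega) rfl rfl

lemma pvRfull_of_mix (nums : List Int) (k : ℕ) (hk2 : 2 ≤ k) (r : PvTbl)
    (h : pvRmix nums k nums.length r) : pvRfull nums k r := by
  intro i' k'
  rw [h i' k']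
  exact if_congr (by omega) rfl rfl

lemma pvWfull_of_mix (nums : List Int) (k : ℕ) (hk2 : 2 ≤ k) (w : PvTbl)
    (h : pvWmix nums k nums.length w) : pvWfull nums k w := by
  intro i' k'
  rw [h i' k']
  exact if_congr (by omega) rfl rfl

lemma pvA_w1 (nums : List Int) : ∀ m, ∀ a b,
    ((List.range m).foldl (fun w i => pvUpd w i 1 (nums.getD i 0)) (⟨fun _ _ => 0⟩ : PvTbl)).f a b =
    if a < m ∧ b = 1 then nums.getD a 0 else 0 := by
  intro m
  induction m with
  | zero => intro a b; simp
  | succ m ih =>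
    intro a b
    rw [List.range_succ, List.foldl_append, List.foldl_cons, List.foldl_nil]
    by_cases h : a = m ∧ b = 1
    · obtain ⟨rfl, rfl⟩ := h
      rw [pvUpd_same, if_pos ⟨by omega, rfl⟩]
    · rw [pvUpd_ne _ _ _ _ _ _ h, ih a b]
      exact if_congr (by omega) rfl rfl

lemma pvA_outer (nums : List Int) (hn : 0 < nums.length) : ∀ m, m + 1 ≤ nums.length →
    pvRfull nums (m + 1) ((List.range' 2 m).foldl
      (fun st k => (List.range nums.length).foldl (fun st i => pvAinner nums k i st) st)
      (⟨fun _ _ => 0⟩,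
       (List.range nums.length).foldl (fun w i => pvUpd w i 1 (nums.getD i 0)) ⟨fun _ _ => 0⟩)).1 ∧
    pvWfull nums (m + 1) ((List.range' 2 m).foldl
      (fun st k => (List.range nums.length).foldl (fun st i => pvAinner nums k i st) st)
      (⟨fun _ _ => 0⟩,
       (List.range nums.length).foldl (fun w i => pvUpd w i 1 (nums.getD i 0)) ⟨fun _ _ => 0⟩)).2 := by
  intro m
  induction m with
  | zero =>
    intro _
    constructor
    · intro i' k'
      simp only [List.range'_zero, List.foldl_nil]
      by_cases h : i' < nums.length ∧ k' ≤ 0 + 1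
      · rw [if_pos h, pvRv_small nums i' k' (by omega)]
      · rw [if_neg h]
    · intro i' k'
      simp only [List.range'_zero, List.foldl_nil]
      rw [pvA_w1 nums nums.length i' k']
      have hb : (i' < nums.length ∧ k' = 1) ↔ (i' < nums.length ∧ 1 ≤ k' ∧ k' ≤ 1) := by omega
      by_cases h : i' < nums.length ∧ 1 ≤ k' ∧ k' ≤ 1
      · rw [if_pos (hb.mpr h), if_pos h]
        have : k' = 1 := by omega
        subst this
        exact (pvSw_one nums i').symm
      · rw [if_neg (fun hc => h (hb.mp hc)), if_neg h]
  | succ m ih =>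
    intro hm
    rw [List.range'_1_concat, List.foldl_append, List.foldl_cons, List.foldl_nil,
        show (2 : ℕ) + m = m + 2 by omega]
    obtain ⟨hr, hw⟩ := ih (by omega)
    have h2 : 2 ≤ m + 2 := by omega
    obtain ⟨hr', hw'⟩ := pvA_iloop nums (m + 2) h2 (by omega) nums.length (le_refl _) _
      (pvRmix_of_full nums (m + 2) h2 _ hr)
      (pvWmix_of_full nums (m + 2) h2 _ hw)
    exact ⟨pvRfull_of_mix nums (m + 2) h2 _ hr', pvWfull_of_mix nums (m + 2) h2 _ hw'⟩

-- ===== B side: the recursion computes the segment values =====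

lemma pvB_pre (nums : List Int) : ∀ m, m ≤ 2 * nums.length → ∀ u,
    ((List.range m).foldl
      (fun pre t => (⟨fun u => if u = t + 1 then pre.f t + (nums ++ nums).getD t 0 else pre.f u⟩ : PvVec))
      ⟨fun _ => 0⟩).f u = if u ≤ m then pvPresum nums u else 0 := by
  intro m
  induction m with
  | zero =>
    intro _ u
    simp only [List.range_zero, List.foldl_nil]
    by_cases h : u ≤ 0
    · rw [if_pos h]
      have : u = 0 := by omega
      subst this
      simp [pvPresum]
    · rw [if_neg h]
  | succ m ih =>
    intro hm u
    rw [List.range_succ, List.foldl_append, List.foldl_cons, List.foldl_nil]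
    simp only []
    by_cases h : u = m + 1
    · subst h
      rw [if_pos rfl, if_pos (le_refl _), ih (by omega) m, if_pos (le_refl m)]
      exact (pv_presum_succ nums m (by omega)).symm
    · rw [if_neg h, ih (by omega) u]
      exact if_congr (by omega) rfl rfl

lemma pvBest_correct (nums : List Int) (pre : PvVec)
    (hpre : ∀ u, u ≤ 2 * nums.length → pre.f u = pvPresum nums u) :
    ∀ fuel i k, i < nums.length → k ≤ nums.length → k ≤ fuel →
    pvBest nums pre fuel i k = pvRv nums i k := by
  intro fuel
  induction fuel with
  | zero =>
    intro i k hi hk hf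
    have : k = 0 := by omega
    subst this
    exact (pvRv_small nums i 0 (by omega)).symm
  | succ fuel ih =>
    intro i k hi hk hf
    by_cases h2 : k < 2
    · simp only [pvBest, if_pos h2]
      exact (pvRv_small nums i k h2).symm
    · have hn : 0 < nums.length := by omega
      have hs : pre.f (i + k) - pre.f i = pvSw nums i k := by
        rw [hpre (i + k) (by omega), hpre i (by omega),
            pv_presum_sub nums hn k i (by omega), Nat.mod_eq_of_lt hi]
      simp only [pvBest, if_neg h2]
      rw [pvRv_eq nums i k (by omega)]
      apply PySem.List.foldl_congr_mem
      intro acc a ha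
      obtain ⟨ha1, ha2⟩ := pv_mem_range'_bounds ha
      simp only [hs, ih i a hi (by omega) (by omega),
        ih ((i + a) % nums.length) (k - a) (Nat.mod_lt _ hn) (by omega) (by omega)]
      rw [pv_if_gt_eq_max]

-- ===== VERDICT (by name: the statement is the Claim_ definition above) =====
theorem pebbleMerge_spec : Claim_equal_pebbleMerge := by
  intro nums _
  unfold Spec_pebbleMerge
  by_cases hn : nums.length = 0
  · obtain rfl : nums = [] := List.length_eq_zero_iff.mp hn
    rfl
  · have hn' : 0 < nums.length := by omega
    unfold pebbleMerge pebbleMerge_alt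
    simp only []
    have hr := (pvA_outer nums hn' (nums.length - 1) (by omega)).1
    have hpre : ∀ u, u ≤ 2 * nums.length →
        ((List.range (2 * nums.length)).foldl
          (fun pre t => (⟨fun u => if u = t + 1 then pre.f t + (nums ++ nums).getD t 0 else pre.f u⟩ : PvVec))
          ⟨fun _ => 0⟩).f u = pvPresum nums u := by
      intro u hu
      rw [pvB_pre nums (2 * nums.length) (le_refl _) u, if_pos hu]
    apply PySem.List.foldl_congr_mem
    intro acc i hi
    have hi' := List.mem_range.mp hi
    rw [hr i nums.length, if_pos ⟨hi', by omega⟩]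
    simp only [pvBest_correct nums _ hpre nums.length i nums.length hi' (le_refl _) (le_refl _)]
    rw [pv_if_gt_eq_max]
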